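-- pv_equiv track=rewrite | github.com/RuanVitorr/atividades-de-Computabilidade-e-Complexidade-de-Algortimos | att09.py | afd_reconhece_101
-- ===== SOURCE A (Python) =====
-- def afd_reconhece_101(palavra):
--     estado = 'q0'
--
--     for char in palavra:
--         if estado == 'q0':
--             if char == '1':
--                 estado = 'q1'
--             elif char == '0':
--                 estado = 'q0'
--             else:
--                 return 'palavra invalida (caractere inválido)'
--         elif estado == 'q1':
--             if char == '0':
--                 estado = 'q2'
--             elif char == '1':
--                 estado = 'q1'
--             else:
--                 return 'palavra invalida (caractere inválido)'
--         elif estado == 'q2':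
--             if char == '1':
--                 estado = 'q3'
--             elif char == '0':
--                 estado = 'q0'
--             else:
--                 return 'palavra invalida (caractere inválido)'
--         elif estado == 'q3':
--
--             if char == '0' or char == '1':
--                 estado = 'q3'
--             else:
--                 return 'palavra invalida (caractere inválido)'
--
--     if estado == 'q3':
--         return "palavra valida (contém a sequência '101')"
--     else:
--         return "palavra invalida (não contém a sequência '101')"
-- ===== SOURCE B (Python) =====
-- def afd_reconhece_101(palavra):
--     if not all(c in '01' for c in palavra):
--         return 'palavra invalida (caractere inválido)'
--     if '101' in palavra:
--         return "palavra valida (contém a sequência '101')"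
--     return "palavra invalida (não contém a sequência '101')"
-- ===== Notes on version B (the rewrite author's own statement) =====
-- stated objective: simpler
-- what changed: Replaces the explicit four-state DFA simulation with a direct check: validate that every character is '0'/'1', then use built-in substring search for '101'.
import Mathlib
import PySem

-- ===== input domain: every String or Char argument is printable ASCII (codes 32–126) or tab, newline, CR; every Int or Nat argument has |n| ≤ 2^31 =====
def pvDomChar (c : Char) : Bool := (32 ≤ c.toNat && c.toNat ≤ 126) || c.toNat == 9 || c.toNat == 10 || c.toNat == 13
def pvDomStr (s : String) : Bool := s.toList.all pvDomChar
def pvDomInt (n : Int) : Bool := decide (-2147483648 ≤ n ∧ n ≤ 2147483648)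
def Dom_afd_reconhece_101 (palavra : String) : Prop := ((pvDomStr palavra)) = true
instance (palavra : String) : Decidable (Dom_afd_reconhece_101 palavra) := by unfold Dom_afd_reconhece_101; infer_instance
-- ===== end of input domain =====

-- B replaces A's four-state DFA simulation with a per-character validity check plus a
-- built-in substring search for "101" (objective: simpler).

-- ===== PORT A =====
-- the for-loop over the word, with the state machine on estado ∈ {"q0","q1","q2","q3"}
-- and the early return on an invalid character; the final acceptance test is reached
-- when the list is exhausted.
def afdLoopA : List Char → String → String
  | [], estado =>
      if estado = "q3" then "palavra valida (contém a sequência '101')"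
      else "palavra invalida (não contém a sequência '101')"
  | c :: rest, estado =>
      if estado = "q0" then
        if c = '1' then afdLoopA rest "q1"
        else if c = '0' then afdLoopA rest "q0"
        else "palavra invalida (caractere inválido)"
      else if estado = "q1" then
        if c = '0' then afdLoopA rest "q2"
        else if c = '1' then afdLoopA rest "q1"
        else "palavra invalida (caractere inválido)"
      else if estado = "q2" then
        if c = '1' then afdLoopA rest "q3"
        else if c = '0' then afdLoopA rest "q0"
        else "palavra invalida (caractere inválido)"
      else if estado = "q3" then
        if c = '0' ∨ c = '1' then afdLoopA rest "q3"
        else "palavra invalida (caractere inválido)"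
      else afdLoopA rest estado   -- unreachable elif chain falls through: loop continues

def afd_reconhece_101 (palavra : String) : String :=
  afdLoopA palavra.toList "q0"

-- ===== PORT B =====
def afd_reconhece_101_alt (palavra : String) : String :=
  if ¬ (palavra.toList.all (fun c => PySem.Chars.isIn [c] ['0', '1'])) then
    "palavra invalida (caractere inválido)"
  else if PySem.Str.isIn "101" palavra then
    "palavra valida (contém a sequência '101')"
  else
    "palavra invalida (não contém a sequência '101')"

-- ===== PRECONDITION & SPEC =====
def Spec_afd_reconhece_101 (palavra : String) (out : String) : Prop := out = afd_reconhece_101_alt palavra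
instance (palavra : String) (out : String) : Decidable (Spec_afd_reconhece_101 palavra out) := by unfold Spec_afd_reconhece_101; infer_instance

-- ===== CLAIM (what is proved, stated in full; the proofs are below) =====
def Claim_equal_afd_reconhece_101 : Prop := ∀ (palavra : String), Dom_afd_reconhece_101 palavra → Spec_afd_reconhece_101 palavra (afd_reconhece_101 palavra)

-- ===== LEMMAS AND PROOFS =====

-- 'c in "01"' is membership of c in {'0','1'}
lemma isIn_single_01 (c : Char) :
    PySem.Chars.isIn [c] ['0', '1'] = (c == '0' || c == '1') := by
  by_cases h0 : c = '0'
  · subst h0; decide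
  · by_cases h1 : c = '1'
    · subst h1; decide
    · have : ¬ [c] <:+: ['0', '1'] := by
        intro h
        have := h.subset (List.mem_singleton.mpr rfl)
        simp at this
        tauto
      rw [(PySem.Chars.isIn_eq_false_iff _ _).mpr this]
      simp [h0, h1]

-- "101" is not found starting at a leading '0'
lemma isIn101_cons0 (cs : List Char) :
    PySem.Chars.isIn ['1', '0', '1'] ('0' :: cs) = PySem.Chars.isIn ['1', '0', '1'] cs := by
  by_cases h : ['1', '0', '1'] <:+: cs
  · rw [(PySem.Chars.isIn_iff_infix _ _).mpr h, (PySem.Chars.isIn_iff_infix _ _).mpr (List.infix_cons h)]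
  · have h2 : ¬ ['1', '0', '1'] <:+: ('0' :: cs) := by
      rw [List.infix_cons_iff]
      rintro (hp | hi)
      · simp [List.cons_prefix_cons] at hp
      · exact h hi
    rw [(PySem.Chars.isIn_eq_false_iff _ _).mpr h, (PySem.Chars.isIn_eq_false_iff _ _).mpr h2]

-- a duplicated leading '1' does not change whether "101" occurs after it
lemma isIn101_11 (cs : List Char) :
    PySem.Chars.isIn ['1', '0', '1'] ('1' :: '1' :: cs) = PySem.Chars.isIn ['1', '0', '1'] ('1' :: cs) := by
  by_cases h : ['1', '0', '1'] <:+: ('1' :: cs)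
  · rw [(PySem.Chars.isIn_iff_infix _ _).mpr h, (PySem.Chars.isIn_iff_infix _ _).mpr (List.infix_cons h)]
  · have h2 : ¬ ['1', '0', '1'] <:+: ('1' :: '1' :: cs) := by
      rw [List.infix_cons_iff]
      rintro (hp | hi)
      · simp [List.cons_prefix_cons] at hp
      · exact h hi
    rw [(PySem.Chars.isIn_eq_false_iff _ _).mpr h, (PySem.Chars.isIn_eq_false_iff _ _).mpr h2]

-- a '1','0','0' start contributes nothing: "101" occurs iff it occurs in the rest
lemma isIn101_100 (cs : List Char) :
    PySem.Chars.isIn ['1', '0', '1'] ('1' :: '0' :: '0' :: cs) = PySem.Chars.isIn ['1', '0', '1'] cs := by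
  by_cases h : ['1', '0', '1'] <:+: cs
  · rw [(PySem.Chars.isIn_iff_infix _ _).mpr h,
        (PySem.Chars.isIn_iff_infix _ _).mpr (List.infix_cons (List.infix_cons (List.infix_cons h)))]
  · have h2 : ¬ ['1', '0', '1'] <:+: ('1' :: '0' :: '0' :: cs) := by
      rw [List.infix_cons_iff, List.infix_cons_iff, List.infix_cons_iff]
      rintro (hp | hp | hp | hi)
      · simp [List.cons_prefix_cons] at hp
      · simp [List.cons_prefix_cons] at hp
      · simp [List.cons_prefix_cons] at hp
      · exact h hi
    rw [(PySem.Chars.isIn_eq_false_iff _ _).mpr h, (PySem.Chars.isIn_eq_false_iff _ _).mpr h2]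

-- "101" occurs in any word starting with it
lemma isIn101_101 (cs : List Char) :
    PySem.Chars.isIn ['1', '0', '1'] ('1' :: '0' :: '1' :: cs) = true := by
  exact (PySem.Chars.isIn_iff_infix _ _).mpr (List.IsPrefix.isInfix (by simp [List.cons_prefix_cons]))

-- DFA run on a word of valid characters, characterized for each reachable state:
-- running from q1 (resp. q2) is running from q0 with "1" (resp. "10") prepended; q3 accepts.
lemma loop_good : ∀ cs : List Char, (∀ c ∈ cs, c = '0' ∨ c = '1') →
    (afdLoopA cs "q0" = (if PySem.Chars.isIn ['1', '0', '1'] cs then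
        "palavra valida (contém a sequência '101')" else "palavra invalida (não contém a sequência '101')"))
    ∧ (afdLoopA cs "q1" = (if PySem.Chars.isIn ['1', '0', '1'] ('1' :: cs) then
        "palavra valida (contém a sequência '101')" else "palavra invalida (não contém a sequência '101')"))
    ∧ (afdLoopA cs "q2" = (if PySem.Chars.isIn ['1', '0', '1'] ('1' :: '0' :: cs) then
        "palavra valida (contém a sequência '101')" else "palavra invalida (não contém a sequência '101')"))
    ∧ (afdLoopA cs "q3" = "palavra valida (contém a sequência '101')") := by
  intro cs
  induction cs with
  | nil => intro _; refine ⟨?_, ?_, ?_, ?_⟩ <;> simp [afdLoopA] <;> decide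
  | cons c rest ih =>
    intro hall
    have hc := hall c (by simp)
    have hrest : ∀ c ∈ rest, c = '0' ∨ c = '1' := fun x hx => hall x (by simp [hx])
    obtain ⟨h0, h1, h2, h3⟩ := ih hrest
    rcases hc with hc | hc <;> subst hc
    · refine ⟨?_, ?_, ?_, ?_⟩ <;> simp [afdLoopA, h0, h2, h3, isIn101_cons0, isIn101_100]
    · refine ⟨?_, ?_, ?_, ?_⟩ <;>
        simp [afdLoopA, h1, h3, isIn101_11, isIn101_101]

-- an invalid character anywhere triggers the early return from any of the four states
lemma loop_bad : ∀ (cs : List Char) (s : String),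
    (s = "q0" ∨ s = "q1" ∨ s = "q2" ∨ s = "q3") →
    (∃ c ∈ cs, c ≠ '0' ∧ c ≠ '1') →
    afdLoopA cs s = "palavra invalida (caractere inválido)" := by
  intro cs
  induction cs with
  | nil => intro s _ hbad; simp at hbad
  | cons c rest ih =>
    intro s hs hbad
    by_cases hc0 : c = '0'
    · subst hc0
      have hrest : ∃ c ∈ rest, c ≠ '0' ∧ c ≠ '1' := by
        rcases hbad with ⟨x, hx, hne⟩
        rcases List.mem_cons.mp hx with rfl | hx
        · exact absurd rfl hne.1
        · exact ⟨x, hx, hne⟩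
      rcases hs with rfl | rfl | rfl | rfl <;>
        simp [afdLoopA] <;> exact ih _ (by tauto) hrest
    · by_cases hc1 : c = '1'
      · subst hc1
        have hrest : ∃ c ∈ rest, c ≠ '0' ∧ c ≠ '1' := by
          rcases hbad with ⟨x, hx, hne⟩
          rcases List.mem_cons.mp hx with rfl | hx
          · exact absurd rfl hne.2
          · exact ⟨x, hx, hne⟩
        rcases hs with rfl | rfl | rfl | rfl <;>
          simp [afdLoopA] <;> exact ih _ (by tauto) hrest
      · rcases hs with rfl | rfl | rfl | rfl <;> simp [afdLoopA, hc0, hc1]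

-- ===== VERDICT (by name: the statement is the Claim_ definition above) =====
theorem afd_reconhece_101_spec : Claim_equal_afd_reconhece_101 := by
  intro palavra _
  unfold Spec_afd_reconhece_101 afd_reconhece_101 afd_reconhece_101_alt
  by_cases hall : ∀ c ∈ palavra.toList, c = '0' ∨ c = '1'
  · have hAllB : palavra.toList.all (fun c => PySem.Chars.isIn [c] ['0', '1']) = true := by
      rw [List.all_eq_true]
      intro c hc
      rw [isIn_single_01]
      rcases hall c hc with rfl | rfl <;> simp
    rw [hAllB]
    have h := (loop_good palavra.toList hall).1
    rw [h]
    have h101 : ("101" : String).toList = ['1', '0', '1'] := by decide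
    simp only [PySem.Str.isIn_eq, h101]
    simp
  · push Not at hall
    have hAllB : palavra.toList.all (fun c => PySem.Chars.isIn [c] ['0', '1']) = false := by
      rcases hall with ⟨c, hc, hne⟩
      rw [List.all_eq_false]
      exact ⟨c, hc, by rw [isIn_single_01]; simp [hne.1, hne.2]⟩
    rw [hAllB]
    rw [loop_bad palavra.toList "q0" (by tauto) hall]
    simp
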